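-- pv_equiv track=rewrite | github.com/evg228-prog/DZ_EGE2026 | DZ_Task-25/21980.py | f
-- ===== SOURCE A (Python) =====
-- def is_prime(num):
--     if num < 2: return False
--     for i in range(2, int(num ** 0.5) + 1):
--         if num % i == 0:
--             return False
--     return True
--
-- def f(num):
--     d = set()
--     for i in range(1, int(num ** 0.5) + 1):
--         if num % i == 0:
--             if is_prime(i) and i % 10 == 7: d.add(i)
--             if is_prime(num // i) and (num // i) % 10 == 7: d.add(num // i)
--     if len(d) > 1:
--         return sum(d) // len(d)
--     return 0
-- ===== SOURCE B (Python) =====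
-- def f(num):
--     primes7 = set()
--     n = num
--     p = 2
--     while p * p <= n:
--         if n % p == 0:
--             if p % 10 == 7:
--                 primes7.add(p)
--             n //= p
--         else:
--             p += 1
--     if n > 1 and n % 10 == 7:
--         primes7.add(n)
--     if len(primes7) > 1:
--         return sum(primes7) // len(primes7)
--     return 0
-- ===== Notes on version B (the rewrite author's own statement) =====
-- stated objective: alternative
-- what changed: B collects the qualifying primes by trial-division factorization of num (dividing out each prime factor, keeping those ending in 7, plus the remaining cofactor) instead of A's enumeration of all divisor pairs (i, num//i) up to sqrt(num) with a separate primality test on each; the averaging tail is the same.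
import Mathlib
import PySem

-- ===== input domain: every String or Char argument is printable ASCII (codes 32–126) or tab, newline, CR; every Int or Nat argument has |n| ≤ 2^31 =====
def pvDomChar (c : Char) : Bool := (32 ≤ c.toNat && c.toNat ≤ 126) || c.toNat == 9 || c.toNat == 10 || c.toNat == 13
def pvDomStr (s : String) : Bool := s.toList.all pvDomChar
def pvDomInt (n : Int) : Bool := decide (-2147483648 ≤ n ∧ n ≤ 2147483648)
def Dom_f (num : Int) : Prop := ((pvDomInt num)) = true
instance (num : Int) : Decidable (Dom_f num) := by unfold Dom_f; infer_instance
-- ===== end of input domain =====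

-- B reads the qualifying primes off a trial-division factorization of num instead of
-- enumerating all divisors up to sqrt(num) and primality-testing each i and num // i
-- (objective: alternative algorithm of similar cost).

-- ===== PORT A =====
-- int(x ** 0.5) is ported as Int.sqrt: exact for 0 ≤ x ≤ 2^31 (float sqrt is floor-correct
-- far below 2^52); for negative x Python raises TypeError (excluded by Pre_f).
def isPrimeA (num : Int) : Bool :=
  if num < 2 then false
  else (PySem.List.pyRange 2 (Int.sqrt num + 1) 1).all (fun i => !(PySem.Int.mod num i == 0))

def stepA (num : Int) (d : PySem.Set Int) (i : Int) : PySem.Set Int :=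
  if PySem.Int.mod num i == 0 then
    let d1 := if isPrimeA i && (PySem.Int.mod i 10 == 7) then PySem.Set.add d i else d
    if isPrimeA (PySem.Int.floordiv num i) && (PySem.Int.mod (PySem.Int.floordiv num i) 10 == 7)
      then PySem.Set.add d1 (PySem.Int.floordiv num i) else d1
  else d

def f (num : Int) : Int :=
  let d : PySem.Set Int := (PySem.List.pyRange 1 (Int.sqrt num + 1) 1).foldl (stepA num) PySem.Set.empty
  if d.length > 1 then PySem.Int.floordiv d.sum (d.length : Int) else 0

-- ===== PORT B =====
-- the Nat fuel is a totality guard only: f_alt supplies num.toNat + 2, which the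
-- fuel-sufficiency lemmas below show is never exhausted before the while-condition fails
def factLoopF : Nat → Int → Int → PySem.Set Int → Int × PySem.Set Int
  | 0, n, _, acc => (n, acc)
  | fuel + 1, n, p, acc =>
    if p * p ≤ n then
      if PySem.Int.mod n p == 0 then
        factLoopF fuel (PySem.Int.floordiv n p) p
          (if PySem.Int.mod p 10 == 7 then PySem.Set.add acc p else acc)
      else factLoopF fuel n (p + 1) acc
    else (n, acc)

def f_alt (num : Int) : Int :=
  let r := factLoopF (num.toNat + 2) num 2 PySem.Set.empty
  let s := if decide (1 < r.1) && (PySem.Int.mod r.1 10 == 7) then PySem.Set.add r.2 r.1 else r.2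
  if s.length > 1 then PySem.Int.floordiv s.sum (s.length : Int) else 0

-- ===== PRECONDITION & SPEC =====
-- Pre_f excludes negative num only: there Python A raises TypeError (int() applied to the complex square root of num).
def Pre_f (num : Int) : Prop := 0 ≤ num
instance (num : Int) : Decidable (Pre_f num) := by unfold Pre_f; infer_instance
def pvWitness_f : Int := 119

def Spec_f (num : Int) (out : Int) : Prop := out = f_alt num
instance (num : Int) (out : Int) : Decidable (Spec_f num out) := by unfold Spec_f; infer_instance

-- ===== CLAIM (what is proved, stated in full; the proofs are below) =====
def Claim_equal_f : Prop := ∀ (num : Int), Dom_f num → Pre_f num → Spec_f num (f num)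

-- ===== LEMMAS AND PROOFS =====

-- the prime divisors of n ending in 7 that both programs collect
def Good (n x : Int) : Prop := 2 ≤ x ∧ Prime x ∧ x ∣ n ∧ PySem.Int.mod x 10 = 7

-- A's trial-division primality test decides Int primality (for x < 2 it answers false)
theorem isPrimeA_iff (x : Int) : isPrimeA x = true ↔ 2 ≤ x ∧ Prime x := by
  unfold isPrimeA
  split_ifs with h
  · simp only [Bool.false_eq_true, false_iff]
    rintro ⟨h2, _⟩; omega
  · push_neg at h
    have hx : x = ((x.toNat : Nat) : Int) := (Int.toNat_of_nonneg (by omega)).symm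
    have hs : Int.sqrt x = ((Nat.sqrt x.toNat : Nat) : Int) := rfl
    rw [List.all_eq_true]
    constructor
    · intro hall
      refine ⟨h, ?_⟩
      rw [hx, Int.prime_iff_natAbs_prime]
      simp only [Int.natAbs_natCast]
      rw [Nat.prime_def_le_sqrt]
      refine ⟨by omega, fun m hm2 hms hdvd => ?_⟩
      have hmem : ((m : Int)) ∈ PySem.List.pyRange 2 (Int.sqrt x + 1) 1 := by
        rw [PySem.List.mem_pyRange_one]
        constructor
        · exact_mod_cast hm2
        · rw [hs]; push_cast; omega
      have := hall _ hmem
      simp only [Bool.not_eq_true', beq_eq_false_iff_ne, ne_eq] at this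
      rw [PySem.Int.mod_eq_zero_iff_dvd] at this
      exact this (by rw [hx]; exact_mod_cast hdvd)
    · rintro ⟨-, hpr⟩ i hi
      rw [PySem.List.mem_pyRange_one] at hi
      simp only [Bool.not_eq_true', beq_eq_false_iff_ne, ne_eq]
      rw [PySem.Int.mod_eq_zero_iff_dvd]
      intro hdvd
      rw [hx, Int.prime_iff_natAbs_prime] at hpr
      simp only [Int.natAbs_natCast] at hpr
      rw [Nat.prime_def_le_sqrt] at hpr
      refine hpr.2 i.toNat ?_ ?_ ?_
      · omega
      · have : i ≤ Int.sqrt x := by omega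
        rw [hs] at this; omega
      · have : ((i.toNat : Nat) : Int) = i := Int.toNat_of_nonneg (by omega)
        rw [← Int.natCast_dvd_natCast]
        rw [this, ← hx]; exact hdvd

-- membership in A's divisor-pair fold
theorem memA (num : Int) (l : List Int) (acc : PySem.Set Int) (x : Int) :
    x ∈ l.foldl (stepA num) acc ↔ x ∈ acc ∨ ∃ i ∈ l, PySem.Int.mod num i = 0 ∧
      ((x = i ∧ isPrimeA i = true ∧ PySem.Int.mod i 10 = 7) ∨
       (x = PySem.Int.floordiv num i ∧ isPrimeA (PySem.Int.floordiv num i) = true ∧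
        PySem.Int.mod (PySem.Int.floordiv num i) 10 = 7)) := by
  induction l generalizing acc with
  | nil => simp
  | cons a t ih =>
    simp only [List.foldl_cons, ih, List.mem_cons]
    have hstep : x ∈ stepA num acc a ↔ x ∈ acc ∨ (PySem.Int.mod num a = 0 ∧
        ((x = a ∧ isPrimeA a = true ∧ PySem.Int.mod a 10 = 7) ∨
         (x = PySem.Int.floordiv num a ∧ isPrimeA (PySem.Int.floordiv num a) = true ∧
          PySem.Int.mod (PySem.Int.floordiv num a) 10 = 7))) := by
      unfold stepA
      split_ifs with h0 h1 h2 h3 h4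
      all_goals
        simp_all only [beq_iff_eq, Bool.and_eq_true, PySem.Set.mem_add, not_and, Bool.not_eq_true]
      all_goals tauto
    rw [hstep]
    constructor
    · rintro (h | h)
      · rcases h with h | h
        · exact Or.inl h
        · exact Or.inr ⟨a, Or.inl rfl, h⟩
      · rcases h with ⟨i, hi, hrest⟩
        exact Or.inr ⟨i, Or.inr hi, hrest⟩
    · rintro (h | ⟨i, hi | hi, hrest⟩)
      · exact Or.inl (Or.inl h)
      · subst hi; exact Or.inl (Or.inr hrest)
      · exact Or.inr ⟨i, hi, hrest⟩

theorem nodupA (num : Int) (l : List Int) (acc : PySem.Set Int) (h : acc.Nodup) :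
    (l.foldl (stepA num) acc).Nodup := by
  induction l generalizing acc with
  | nil => exact h
  | cons a t ih =>
    refine ih _ ?_
    unfold stepA
    split_ifs
    all_goals first
      | exact h
      | exact PySem.Set.nodup_add _ _ h
      | exact PySem.Set.nodup_add _ _ (PySem.Set.nodup_add _ _ h)

theorem charA (num : Int) (h1 : 1 ≤ num) (x : Int) :
    x ∈ (PySem.List.pyRange 1 (Int.sqrt num + 1) 1).foldl (stepA num) PySem.Set.empty ↔
      Good num x := by
  rw [memA]
  have hempty : x ∉ (PySem.Set.empty : PySem.Set Int) := by simp [PySem.Set.empty]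
  have hnumcast : ((num.toNat : Nat) : Int) = num := Int.toNat_of_nonneg (by omega)
  have hs : Int.sqrt num = ((Nat.sqrt num.toNat : Nat) : Int) := rfl
  have hsqle : num < (Int.sqrt num + 1) * (Int.sqrt num + 1) := by
    have h2 := Nat.lt_succ_sqrt num.toNat
    rw [Nat.succ_eq_add_one] at h2
    have h3 : (num.toNat : Int) < ((Nat.sqrt num.toNat + 1 : Nat) : Int) * ((Nat.sqrt num.toNat + 1 : Nat) : Int) := by
      exact_mod_cast h2
    rw [hnumcast] at h3
    rw [hs]; push_cast at h3 ⊢; linarith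
  constructor
  · rintro (h | ⟨i, hi, hmod, hcase⟩)
    · exact absurd h hempty
    rw [PySem.List.mem_pyRange_one] at hi
    have hipos : 0 < i := by omega
    have hidvd : i ∣ num := (PySem.Int.mod_eq_zero_iff_dvd _ _).mp hmod
    rcases hcase with ⟨rfl, hp, h7⟩ | ⟨rfl, hp, h7⟩
    · exact ⟨(isPrimeA_iff _).mp hp |>.1, (isPrimeA_iff _).mp hp |>.2, hidvd, h7⟩
    · refine ⟨(isPrimeA_iff _).mp hp |>.1, (isPrimeA_iff _).mp hp |>.2, ?_, h7⟩
      rw [PySem.Int.floordiv_eq_ediv_of_pos hipos]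
      exact ⟨i, (Int.ediv_mul_cancel hidvd).symm⟩
  · rintro ⟨hx2, hxp, hxd, hx7⟩
    refine Or.inr ?_
    have hxpos : 0 < x := by omega
    have hxle : x ≤ num := Int.le_of_dvd (by omega) hxd
    by_cases hcase : x ≤ Int.sqrt num
    · refine ⟨x, ?_, ?_, Or.inl ⟨rfl, (isPrimeA_iff x).mpr ⟨hx2, hxp⟩, hx7⟩⟩
      · rw [PySem.List.mem_pyRange_one]; omega
      · exact (PySem.Int.mod_eq_zero_iff_dvd _ _).mpr hxd
    · push_neg at hcase
      obtain ⟨c, hc⟩ := hxd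
      have hcpos : 1 ≤ c := by nlinarith
      have hcle : c ≤ Int.sqrt num := by nlinarith
      have hdiv : num / c = x := by
        rw [hc, mul_comm, Int.mul_ediv_cancel_left _ (by omega)]
      refine ⟨c, ?_, ?_, Or.inr ?_⟩
      · rw [PySem.List.mem_pyRange_one]; omega
      · exact (PySem.Int.mod_eq_zero_iff_dvd _ _).mpr ⟨x, by rw [hc, mul_comm]⟩
      · rw [PySem.Int.floordiv_eq_ediv_of_pos (by omega), hdiv]
        exact ⟨rfl, (isPrimeA_iff x).mpr ⟨hx2, hxp⟩, hx7⟩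

-- if n >= 1 has no divisor in [2, p) and n < p * p then n = 1 or n is prime
theorem one_or_prime (n p : Int) (hp : 2 ≤ p) (hn : 1 ≤ n)
    (hinv : ∀ q : Int, 2 ≤ q → q < p → ¬ q ∣ n) (hlt : n < p * p) :
    n = 1 ∨ Prime n := by
  by_cases h1 : n = 1
  · exact Or.inl h1
  right
  have hn2 : 2 ≤ n := by omega
  have hcast : ((n.toNat : Nat) : Int) = n := Int.toNat_of_nonneg (by omega)
  rw [← hcast, Int.prime_iff_natAbs_prime]
  simp only [Int.natAbs_natCast]
  by_contra hnp
  have hq := Nat.minFac_sq_le_self (n := n.toNat) (by omega) hnp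
  have hqp : (n.toNat).minFac.Prime := Nat.minFac_prime (by omega)
  have hq2 : 2 ≤ (n.toNat).minFac := hqp.two_le
  have hqd : (n.toNat).minFac ∣ n.toNat := Nat.minFac_dvd _
  set q := (n.toNat).minFac with hqdef
  have hqdInt : ((q : Nat) : Int) ∣ n := by
    rw [← hcast]; exact_mod_cast hqd
  have hqlt : ((q : Nat) : Int) < p := by
    by_contra hge
    push_neg at hge
    have : ((q * q : Nat) : Int) ≤ n := by rw [← hcast]; exact_mod_cast (by simpa [pow_two] using hq)
    push_cast at this
    nlinarith
  exact hinv _ (by exact_mod_cast hq2) hqlt hqdInt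

theorem baseChar (n p : Int) (acc : PySem.Set Int) (hp : 2 ≤ p) (hn : 1 ≤ n)
    (hinv : ∀ q : Int, 2 ≤ q → q < p → ¬ q ∣ n) (hlt : n < p * p) (x : Int) :
    (x ∈ (if decide (1 < n) && (PySem.Int.mod n 10 == 7) then PySem.Set.add acc n else acc) ↔
      x ∈ acc ∨ Good n x) := by
  rcases one_or_prime n p hp hn hinv hlt with h1 | hpr
  · subst h1
    rw [if_neg (by simp only [Bool.and_eq_true, decide_eq_true_eq, not_and]; intro h; omega)]
    constructor
    · exact Or.inl
    · rintro (h | ⟨hx2, _, hxd, _⟩)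
      · exact h
      · have := Int.eq_one_of_dvd_one (by omega) hxd
        omega
  · have hn2 : 2 ≤ n := by
      rcases Int.prime_iff_natAbs_prime.mp hpr with h
      have := h.two_le
      omega
    have hgood : ∀ y : Int, Good n y ↔ (y = n ∧ PySem.Int.mod n 10 = 7) := by
      intro y
      constructor
      · rintro ⟨hy2, hyp, hyd, hy7⟩
        have hy : y = n := by
          have hN := Int.prime_iff_natAbs_prime.mp hpr
          have hY := Int.prime_iff_natAbs_prime.mp hyp
          have hdN : y.natAbs ∣ n.natAbs := Int.natAbs_dvd_natAbs.mpr hyd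
          have := (Nat.Prime.eq_one_or_self_of_dvd hN _ hdN).resolve_left (by
            have := hY.two_le; omega)
          omega
        subst hy
        exact ⟨rfl, hy7⟩
      · rintro ⟨rfl, h7⟩
        refine ⟨hn2, hpr, dvd_refl _, h7⟩
    by_cases h7 : PySem.Int.mod n 10 = 7
    · rw [if_pos (by simp only [Bool.and_eq_true, decide_eq_true_eq, beq_iff_eq]; exact ⟨by omega, h7⟩)]
      rw [PySem.Set.mem_add]
      simp only [hgood x, h7, and_true]
    · rw [if_neg (by simp only [Bool.and_eq_true, decide_eq_true_eq, beq_iff_eq, not_and]; exact fun _ => h7)]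
      constructor
      · exact Or.inl
      · rintro (h | hg)
        · exact h
        · rw [hgood] at hg; exact absurd hg.2 h7

theorem goodSplit (n p x : Int) (hp : 2 ≤ p) (hpp : Prime p) (hdvd : p ∣ n) (hn : 1 ≤ n) :
    Good n x ↔ (x = p ∧ PySem.Int.mod p 10 = 7) ∨ Good (n / p) x := by
  have hfac : n = p * (n / p) := (Int.mul_ediv_cancel' hdvd).symm
  constructor
  · rintro ⟨hx2, hxp, hxd, hx7⟩
    rw [hfac] at hxd
    rcases (hxp.2.2 _ _ hxd).imp id id with hxq | hxq
    · left
      have hx : x = p := by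
        have hP := Int.prime_iff_natAbs_prime.mp hpp
        have hX := Int.prime_iff_natAbs_prime.mp hxp
        have hdN : x.natAbs ∣ p.natAbs := Int.natAbs_dvd_natAbs.mpr hxq
        have := (Nat.Prime.eq_one_or_self_of_dvd hP _ hdN).resolve_left (by
          have := hX.two_le; omega)
        omega
      subst hx
      exact ⟨rfl, hx7⟩
    · exact Or.inr ⟨hx2, hxp, hxq, hx7⟩
  · rintro (⟨rfl, h7⟩ | ⟨hx2, hxp, hxd, hx7⟩)
    · exact ⟨hp, hpp, hdvd, h7⟩
    · exact ⟨hx2, hxp, hxd.trans ⟨p, (Int.ediv_mul_cancel hdvd).symm⟩, hx7⟩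

def wrapB (r : Int × PySem.Set Int) : PySem.Set Int :=
  if decide (1 < r.1) && (PySem.Int.mod r.1 10 == 7) then PySem.Set.add r.2 r.1 else r.2

theorem charB (fuel : Nat) : ∀ (n p : Int) (acc : PySem.Set Int), 2 ≤ p → 1 ≤ n →
    n.toNat + 2 ≤ fuel + p.toNat →
    (∀ q : Int, 2 ≤ q → q < p → ¬ q ∣ n) → ∀ x : Int,
    (x ∈ wrapB (factLoopF fuel n p acc) ↔ x ∈ acc ∨ Good n x) := by
  induction fuel with
  | zero =>
    intro n p acc hp hn hfuel hinv x
    have hple : n + 1 ≤ p := by omega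
    have hlt : n < p * p := by nlinarith
    simp only [factLoopF, wrapB]
    exact baseChar n p acc hp hn hinv hlt x
  | succ fuel ih =>
    intro n p acc hp hn hfuel hinv x
    simp only [factLoopF]
    by_cases hguard : p * p ≤ n
    · rw [if_pos hguard]
      by_cases hdiv : (PySem.Int.mod n p == 0) = true
      · rw [if_pos hdiv]
        rw [beq_iff_eq, PySem.Int.mod_eq_zero_iff_dvd] at hdiv
        have hppos : (0:Int) < p := by omega
        have hfac : n = p * (n / p) := (Int.mul_ediv_cancel' hdiv).symm
        have hq1 : 1 ≤ n / p := by nlinarith [hfac]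
        have hqlt : n / p + 1 ≤ n := by nlinarith [hfac]
        have hppr : Prime p := by
          have hcast : ((p.toNat : Nat) : Int) = p := Int.toNat_of_nonneg (by omega)
          rw [← hcast, Int.prime_iff_natAbs_prime]
          simp only [Int.natAbs_natCast]
          rw [Nat.prime_def_lt]
          refine ⟨by omega, fun m hm hmd => ?_⟩
          by_contra hm1
          have hm2 : 2 ≤ m := by
            rcases Nat.eq_zero_or_pos m with h0 | h1
            · subst h0; simp at hmd; omega
            · omega
          have hmdInt : ((m : Nat) : Int) ∣ n := by
            refine dvd_trans ?_ hdiv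
            rw [← hcast]; exact_mod_cast hmd
          exact hinv _ (by exact_mod_cast hm2) (by rw [← hcast]; exact_mod_cast hm) hmdInt
        rw [PySem.Int.floordiv_eq_ediv_of_pos hppos]
        rw [ih (n / p) p _ hp hq1 (by omega)
            (fun q hq2 hqp hqd => hinv q hq2 hqp (hqd.trans ⟨p, (Int.ediv_mul_cancel hdiv).symm⟩)) x]
        rw [goodSplit n p x hp hppr hdiv hn]
        by_cases h7 : (PySem.Int.mod p 10 == 7) = true
        · rw [if_pos h7, beq_iff_eq] at *
          rw [PySem.Set.mem_add]
          constructor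
          · rintro ((h | h) | h)
            · exact Or.inl h
            · exact Or.inr (Or.inl ⟨h, h7⟩)
            · exact Or.inr (Or.inr h)
          · rintro (h | ⟨h, -⟩ | h)
            · exact Or.inl (Or.inl h)
            · exact Or.inl (Or.inr h)
            · exact Or.inr h
        · rw [if_neg h7]
          rw [beq_iff_eq] at h7
          constructor
          · rintro (h | h)
            · exact Or.inl h
            · exact Or.inr (Or.inr h)
          · rintro (h | ⟨-, hc⟩ | h)
            · exact Or.inl h
            · exact absurd hc h7
            · exact Or.inr h
      · rw [if_neg hdiv]
        rw [beq_iff_eq] at hdiv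
        rw [PySem.Int.mod_eq_zero_iff_dvd] at hdiv
        have hple : p ≤ n := by nlinarith
        refine ih n (p + 1) acc (by omega) hn (by omega) (fun q hq2 hqp hqd => ?_) x
        rcases lt_or_eq_of_le (show q ≤ p by omega) with h | h
        · exact hinv q hq2 h hqd
        · subst h; exact hdiv hqd
    · rw [if_neg hguard]
      have hlt : n < p * p := not_le.mp hguard
      simp only [wrapB]
      exact baseChar n p acc hp hn hinv hlt x

theorem nodupB (fuel : Nat) : ∀ (n p : Int) (acc : PySem.Set Int), acc.Nodup →
    (wrapB (factLoopF fuel n p acc)).Nodup := by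
  induction fuel with
  | zero =>
    intro n p acc h
    simp only [factLoopF, wrapB]
    split_ifs
    · exact PySem.Set.nodup_add _ _ h
    · exact h
  | succ fuel ih =>
    intro n p acc h
    simp only [factLoopF]
    by_cases hguard : p * p ≤ n
    · rw [if_pos hguard]
      by_cases hdiv : (PySem.Int.mod n p == 0) = true
      · rw [if_pos hdiv]
        refine ih _ _ _ ?_
        split_ifs
        · exact PySem.Set.nodup_add _ _ h
        · exact h
      · rw [if_neg hdiv]
        exact ih _ _ _ h
    · rw [if_neg hguard]
      simp only [wrapB]
      split_ifs
      · exact PySem.Set.nodup_add _ _ h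
      · exact h

theorem f_spec : Claim_equal_f := by
  unfold Claim_equal_f Spec_f Pre_f
  intro num _ hpre
  by_cases h0 : num = 0
  · subst h0; decide
  · have h1 : 1 ≤ num := by omega
    unfold f f_alt
    have hmemB := charB (num.toNat + 2) num 2 PySem.Set.empty (by omega) h1 (by omega)
      (fun q hq2 hqp _ => by omega)
    have hperm : ((PySem.List.pyRange 1 (Int.sqrt num + 1) 1).foldl (stepA num) PySem.Set.empty).Perm
        (wrapB (factLoopF (num.toNat + 2) num 2 PySem.Set.empty)) := by
      rw [List.perm_ext_iff_of_nodup (nodupA num _ _ (by simp [PySem.Set.empty]))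
        (nodupB _ _ _ _ (by simp [PySem.Set.empty]))]
      intro a
      rw [charA num h1 a, hmemB a]
      simp [PySem.Set.empty]
    show (if ((PySem.List.pyRange 1 (Int.sqrt num + 1) 1).foldl (stepA num) PySem.Set.empty).length > 1
        then PySem.Int.floordiv ((PySem.List.pyRange 1 (Int.sqrt num + 1) 1).foldl (stepA num) PySem.Set.empty).sum
          (((PySem.List.pyRange 1 (Int.sqrt num + 1) 1).foldl (stepA num) PySem.Set.empty).length : Int)
        else 0)
      = (if (wrapB (factLoopF (num.toNat + 2) num 2 PySem.Set.empty)).length > 1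
        then PySem.Int.floordiv (wrapB (factLoopF (num.toNat + 2) num 2 PySem.Set.empty)).sum
          ((wrapB (factLoopF (num.toNat + 2) num 2 PySem.Set.empty)).length : Int)
        else 0)
    rw [hperm.length_eq, hperm.sum_eq]
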